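-- pv_equiv track=rewrite | github.com/bingran-you/smolclaw | claw_gdoc/api/render.py | _merge_field_mask
-- ===== SOURCE A (Python) =====
-- from typing import Any
--
-- def _merge_field_mask(
--     current: dict[str, Any],
--     updates: dict[str, Any],
--     requested_fields: list[str],
-- ) -> dict[str, Any]:
--     next_value = dict(current)
--     for field in requested_fields:
--         if field in updates:
--             next_value[field] = updates[field]
--         else:
--             next_value.pop(field, None)
--     return next_value
-- ===== SOURCE B (Python) =====
-- def _merge_field_mask(current, updates, requested_fields):
--     requested = set(requested_fields)
--     kept = []
--     for k, v in current.items():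
--         if k in requested:
--             if k in updates:
--                 kept.append((k, updates[k]))
--         else:
--             kept.append((k, v))
--     seen = set()
--     new = []
--     for f in requested_fields:
--         if f not in seen:
--             seen.add(f)
--             if f not in current and f in updates:
--                 new.append((f, updates[f]))
--     return dict(kept + new)
-- ===== Notes on version B (the rewrite author's own statement) =====
-- stated objective: alternative
-- what changed: Instead of copying the current dict and mutating it (insert/pop) per requested field, B never mutates a dict: it builds the surviving (key, value) pairs from current in one pass, collects brand-new pairs from the deduplicated requested fields in a second pass, and assembles the result with one dict(kept + new) construction.
import Mathlib
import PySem

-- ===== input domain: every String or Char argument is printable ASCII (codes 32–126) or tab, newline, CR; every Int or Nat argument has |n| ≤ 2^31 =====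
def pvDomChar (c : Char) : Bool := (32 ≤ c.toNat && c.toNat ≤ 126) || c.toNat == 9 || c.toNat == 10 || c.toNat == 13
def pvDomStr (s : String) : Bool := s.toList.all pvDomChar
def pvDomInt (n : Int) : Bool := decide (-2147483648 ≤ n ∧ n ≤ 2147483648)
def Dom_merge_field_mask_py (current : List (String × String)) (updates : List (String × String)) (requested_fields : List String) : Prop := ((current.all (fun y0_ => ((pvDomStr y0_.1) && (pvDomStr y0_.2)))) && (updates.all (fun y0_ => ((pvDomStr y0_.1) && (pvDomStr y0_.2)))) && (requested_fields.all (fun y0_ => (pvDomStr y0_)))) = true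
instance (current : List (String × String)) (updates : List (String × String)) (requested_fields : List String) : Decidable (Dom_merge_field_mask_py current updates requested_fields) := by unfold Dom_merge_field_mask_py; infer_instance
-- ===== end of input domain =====

-- B replaces A's copy-then-mutate dict loop by pure list building (kept pairs from current, new pairs from the deduplicated requested fields, one final dict(kept + new)); alternative decomposition, same cost; equivalence of return values proved.

-- ===== PORT A =====
-- the body of A's `for field in requested_fields` loop: set from updates, else pop
def mfmStep (upd : PySem.Dict String String) (d : PySem.Dict String String) (field : String) : PySem.Dict String String :=
  match upd.get? field with
  | some v => d.insert field v
  | none   => d.erase field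

def merge_field_mask_py (current : List (String × String)) (updates : List (String × String)) (requested_fields : List String) : List (String × String) :=
  let upd := PySem.Dict.ofList updates
  let next_value := requested_fields.foldl (mfmStep upd) (PySem.Dict.ofList current)
  next_value.items

-- ===== PORT B =====
-- body of B's first loop over current.items(): keep (k, updates[k]) for requested keys present in updates, drop requested keys absent from updates, keep (k, v) otherwise
def mfmKeptStep (req : PySem.Set String) (upd : PySem.Dict String String)
    (acc : List (String × String)) (kv : String × String) : List (String × String) :=
  if PySem.Set.contains req kv.1 then
    match upd.get? kv.1 with
    | some w => acc ++ [(kv.1, w)]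
    | none   => acc
  else acc ++ [kv]

-- body of B's second loop over requested_fields: guard by the `seen` set, append (f, updates[f]) when f is new to current and present in updates
def mfmNewStep (c upd : PySem.Dict String String)
    (st : PySem.Set String × List (String × String)) (f : String) :
    PySem.Set String × List (String × String) :=
  if PySem.Set.contains st.1 f then st
  else
    (PySem.Set.add st.1 f,
     if !(c.contains f) then
       match upd.get? f with
       | some w => st.2 ++ [(f, w)]
       | none   => st.2
     else st.2)

def merge_field_mask_py_alt (current : List (String × String)) (updates : List (String × String)) (requested_fields : List String) : List (String × String) :=
  let c := PySem.Dict.ofList current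
  let upd := PySem.Dict.ofList updates
  let requested := PySem.Set.ofList requested_fields
  let kept := c.items.foldl (mfmKeptStep requested upd) []
  let nw := (requested_fields.foldl (mfmNewStep c upd) (PySem.Set.empty, [])).2
  (PySem.Dict.ofList (kept ++ nw)).items

-- ===== PRECONDITION & SPEC =====
def Spec_merge_field_mask_py (current : List (String × String)) (updates : List (String × String)) (requested_fields : List String) (out : List (String × String)) : Prop := out = merge_field_mask_py_alt current updates requested_fields
instance (current : List (String × String)) (updates : List (String × String)) (requested_fields : List String) (out : List (String × String)) : Decidable (Spec_merge_field_mask_py current updates requested_fields out) := by unfold Spec_merge_field_mask_py; infer_instance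

-- ===== CLAIM (what is proved, stated in full; the proofs are below) =====
def Claim_equal_merge_field_mask_py : Prop := ∀ (current : List (String × String)) (updates : List (String × String)) (requested_fields : List String), Dom_merge_field_mask_py current updates requested_fields → Spec_merge_field_mask_py current updates requested_fields (merge_field_mask_py current updates requested_fields)

-- ===== LEMMAS AND PROOFS =====

-- canonical description of the result's items list, shared by both ports
def mfmKeep (u : PySem.Dict String String) (rf : List String) (kv : String × String) : Option (String × String) :=
  if kv.1 ∈ rf then (u.get? kv.1).map (fun v => (kv.1, v)) else some kv

def mfmNewsF (c u : PySem.Dict String String) (f : String) : Option (String × String) :=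
  if c.contains f then none else (u.get? f).map (fun v => (f, v))

def mfmCanon (c u : PySem.Dict String String) (rf : List String) : List (String × String) :=
  c.items.filterMap (mfmKeep u rf) ++ (PySem.List.dedup rf).filterMap (mfmNewsF c u)

-- generic list lemmas
theorem mfm_filter_filterMap {α β : Type} (g : α → Option β) (p : β → Bool) (l : List α) :
    (l.filterMap g).filter p = l.filterMap (fun a => (g a).filter p) := by
  induction l with
  | nil => rfl
  | cons x xs ih =>
    simp only [List.filterMap_cons]
    cases hx : g x with
    | none => simpa [hx] using ih
    | some b =>
      by_cases hp : p b = true <;> simp [hx, Option.filter, hp, List.filter_cons, ih]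

theorem mfm_dedup_append_singleton (xs : List String) (x : String) :
    PySem.List.dedup (xs ++ [x]) = if x ∈ xs then PySem.List.dedup xs else PySem.List.dedup xs ++ [x] := by
  simp only [PySem.List.dedup, PySem.Set.ofList_append_singleton, PySem.Set.add]
  by_cases h : x ∈ xs
  · have hc : (PySem.Set.ofList xs).contains x = true :=
      (PySem.Set.contains_iff _ _).2 ((PySem.Set.mem_ofList _ _).2 h)
    simp [hc, h]
  · have hc : ¬ (PySem.Set.ofList xs).contains x = true :=
      fun hc => h ((PySem.Set.mem_ofList _ _).1 ((PySem.Set.contains_iff _ _).1 hc))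
    simp [hc, h]

theorem mfm_keep_key (u : PySem.Dict String String) (rf : List String)
    (kv p : String × String) (h : mfmKeep u rf kv = some p) : p.1 = kv.1 := by
  unfold mfmKeep at h
  split at h
  · cases hg : u.get? kv.1 <;> rw [hg] at h <;> simp at h
    simp [← h]
  · simp at h; simp [← h]

theorem mfm_news_some (c u : PySem.Dict String String) (f : String)
    (p : String × String) (h : mfmNewsF c u f = some p) :
    p.1 = f ∧ c.contains f = false ∧ u.get? f = some p.2 := by
  unfold mfmNewsF at h
  split at h
  · simp at h
  · rename_i hc
    cases hg : u.get? f <;> rw [hg] at h <;> simp at h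
    refine ⟨by simp [← h], by simpa using hc, by simp [hg, ← h]⟩

-- L1: A's loop computes the canonical list
theorem mfm_A_char (u c : PySem.Dict String String) (rf : List String) :
    (rf.foldl (mfmStep u) c).items = mfmCanon c u rf := by
  induction rf using List.reverseRecOn with
  | nil => simp [mfmCanon, mfmKeep, PySem.List.dedup, PySem.Set.ofList]
  | append_singleton xs x ih =>
    rw [List.foldl_append]
    simp only [List.foldl_cons, List.foldl_nil]
    cases hu : u.get? x with
    | none =>
      simp only [mfmStep, hu]
      have herase : ((xs.foldl (mfmStep u) c).erase x).items
          = (xs.foldl (mfmStep u) c).items.filter (fun p => !(p.1 == x)) := rfl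
      rw [herase, ih]
      unfold mfmCanon
      rw [List.filter_append, mfm_filter_filterMap, mfm_filter_filterMap,
        mfm_dedup_append_singleton]
      congr 1
      · apply List.filterMap_congr
        intro kv _
        by_cases hk : kv.1 = x
        · by_cases hm : x ∈ xs <;> simp [mfmKeep, hk, hm, hu, Option.filter]
        · by_cases hm : kv.1 ∈ xs
          · cases hg : u.get? kv.1 <;> simp [mfmKeep, hk, hm, hg, Option.filter]
          · simp [mfmKeep, hk, hm, Option.filter]
      · have hpt : ∀ f ∈ PySem.List.dedup xs,
            (mfmNewsF c u f).filter (fun p => !(p.1 == x)) = mfmNewsF c u f := by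
          intro f _
          by_cases hf : f = x
          · subst hf; simp [mfmNewsF, hu, Option.filter]
          · unfold mfmNewsF
            by_cases hcf : c.contains f = true <;>
              cases hg : u.get? f <;> simp [hcf, hg, Option.filter, hf]
        by_cases hx : x ∈ xs
        · simp only [hx, if_pos]
          exact List.filterMap_congr hpt
        · simp only [hx, if_neg, List.filterMap_append]
          rw [List.filterMap_congr hpt]
          simp [mfmNewsF, hu]
    | some v =>
      simp only [mfmStep, hu]
      have hcont : (xs.foldl (mfmStep u) c).contains x
          = (c.contains x || decide (x ∈ xs)) := by
        rw [Bool.eq_iff_iff]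
        simp only [PySem.Dict.contains, ih, mfmCanon, List.any_append, Bool.or_eq_true,
          List.any_eq_true, List.mem_filterMap, decide_eq_true_eq]
        constructor
        · rintro (⟨p, ⟨kv, hkv, hg⟩, hpx⟩ | ⟨p, ⟨f, hf, hg⟩, hpx⟩)
          · left
            have h1 := mfm_keep_key u xs kv p hg
            have h2 : p.1 = x := by simpa using hpx
            exact ⟨kv, hkv, by simp [← h1, h2]⟩
          · right
            obtain ⟨h1, _, _⟩ := mfm_news_some c u f p hg
            have h2 : p.1 = x := by simpa using hpx
            have : f = x := by rw [← h1, h2]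
            subst this
            exact (PySem.Set.mem_ofList xs f).1 hf
        · rintro (hcx | hx)
          · obtain ⟨kv, hkv, hkx⟩ := hcx
            have hkx' : kv.1 = x := by simpa using hkx
            left
            by_cases hm : kv.1 ∈ xs
            · exact ⟨(kv.1, v), ⟨kv, hkv, by
                unfold mfmKeep; rw [if_pos hm, hkx', hu]; rfl⟩, by simp [hkx']⟩
            · exact ⟨kv, ⟨kv, hkv, by simp [mfmKeep, hm]⟩, hkx⟩
          · by_cases hcx : c.contains x = true
            · obtain ⟨kv, hkv, hkx⟩ := by
                simpa only [PySem.Dict.contains, List.any_eq_true] using hcx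
              left
              have hkx' : kv.1 = x := by simpa using hkx
              by_cases hm : kv.1 ∈ xs
              · exact ⟨(kv.1, v), ⟨kv, hkv, by
                  unfold mfmKeep; rw [if_pos hm, hkx', hu]; rfl⟩, by simp [hkx']⟩
              · exact ⟨kv, ⟨kv, hkv, by simp [mfmKeep, hm]⟩, by simp [hkx']⟩
            · right
              have hcx' : c.contains x = false := by simpa using hcx
              exact ⟨(x, v), ⟨x, (PySem.Set.mem_ofList xs x).2 hx,
                by simp [mfmNewsF, hcx', hu]⟩, by simp⟩
      by_cases hcx : c.contains x = true
      · have hcD : (xs.foldl (mfmStep u) c).contains x = true := by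
          simp [hcont, hcx]
        rw [PySem.Dict.items_insert_of_contains _ v hcD, ih]
        unfold mfmCanon
        rw [List.map_append, List.map_filterMap, List.map_filterMap,
          mfm_dedup_append_singleton]
        congr 1
        · apply List.filterMap_congr
          intro kv _
          by_cases hk : kv.1 = x
          · by_cases hm : x ∈ xs <;> simp [mfmKeep, hk, hm, hu]
          · by_cases hm : kv.1 ∈ xs
            · cases hg : u.get? kv.1 <;> simp [mfmKeep, hk, hm, hg]
            · simp [mfmKeep, hk, hm]
        · have hpt : ∀ f ∈ PySem.List.dedup xs,
              (mfmNewsF c u f).map (fun p => if (p.1 == x) = true then (x, v) else p)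
                = mfmNewsF c u f := by
            intro f _
            by_cases hf : f = x
            · subst hf; simp [mfmNewsF, hcx]
            · unfold mfmNewsF
              by_cases hcf : c.contains f = true <;>
                cases hg : u.get? f <;> simp [hcf, hg, hf]
          by_cases hm : x ∈ xs
          · simp only [hm, if_pos]
            exact List.filterMap_congr hpt
          · simp only [hm, if_neg, List.filterMap_append]
            rw [List.filterMap_congr hpt]
            simp [mfmNewsF, hcx]
      · have hcx' : c.contains x = false := by simpa using hcx
        have hnk : ∀ kv ∈ c.items, kv.1 ≠ x := by
          intro kv hkv hk
          apply hcx
          simp only [PySem.Dict.contains, List.any_eq_true]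
          exact ⟨kv, hkv, by simp [hk]⟩
        have hcpart : ∀ rep : String × String → String × String,
            (∀ p : String × String, p.1 ≠ x → rep p = p) →
            c.items.filterMap (fun kv => (mfmKeep u xs kv).map rep)
              = c.items.filterMap (mfmKeep u (xs ++ [x])) := by
          intro rep hrep
          apply List.filterMap_congr
          intro kv hkv
          have hk := hnk kv hkv
          unfold mfmKeep
          by_cases hm : kv.1 ∈ xs
          · cases hg : u.get? kv.1 with
            | none => simp [hm, hk, hg]
            | some w => simp [hm, hk, hg, hrep (kv.1, w) hk]
          · simp [hm, hk, hrep kv hk]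
        by_cases hm : x ∈ xs
        · have hcD : (xs.foldl (mfmStep u) c).contains x = true := by
            simp [hcont, hm]
          rw [PySem.Dict.items_insert_of_contains _ v hcD, ih]
          unfold mfmCanon
          rw [List.map_append, List.map_filterMap, List.map_filterMap,
            mfm_dedup_append_singleton]
          simp only [hm, if_pos]
          congr 1
          · apply hcpart
            intro p hp
            simp [hp]
          · apply List.filterMap_congr
            intro f _
            by_cases hf : f = x
            · subst hf; simp [mfmNewsF, hcx', hu]
            · unfold mfmNewsF
              by_cases hcf : c.contains f = true <;>
                cases hg : u.get? f <;> simp [hcf, hg, hf]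
        · have hcD : (xs.foldl (mfmStep u) c).contains x = false := by
            simp [hcont, hcx', hm]
          rw [PySem.Dict.items_insert_of_not_contains _ v hcD, ih]
          unfold mfmCanon
          rw [mfm_dedup_append_singleton]
          simp only [hm, if_neg, List.filterMap_append, List.append_assoc]
          congr 1
          · have := hcpart id (fun p _ => rfl)
            simpa using this
          · simp [mfmNewsF, hcx', hu]

-- L2: B's first loop is the filterMap of mfmKeep
theorem mfm_kept_char (u : PySem.Dict String String) (rf : List String)
    (l acc : List (String × String)) :
    l.foldl (mfmKeptStep (PySem.Set.ofList rf) u) acc = acc ++ l.filterMap (mfmKeep u rf) := by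
  induction l generalizing acc with
  | nil => simp
  | cons kv tl ih =>
    simp only [List.foldl_cons, List.filterMap_cons]
    by_cases hm : kv.1 ∈ rf
    · have hc : (PySem.Set.ofList rf).contains kv.1 = true :=
        (PySem.Set.contains_iff _ _).2 ((PySem.Set.mem_ofList _ _).2 hm)
      cases hg : u.get? kv.1 with
      | none => simp [mfmKeptStep, mfmKeep, hc, hm, hg, ih]
      | some w => simp [mfmKeptStep, mfmKeep, hc, hm, hg, ih]
    · have hc : (PySem.Set.ofList rf).contains kv.1 = false := by
        rw [Bool.eq_false_iff]
        exact fun h => hm ((PySem.Set.mem_ofList _ _).1 ((PySem.Set.contains_iff _ _).1 h))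
      simp [mfmKeptStep, mfmKeep, hc, hm, ih]

-- L3: B's second loop produces (seen set, filterMap of mfmNewsF over the deduplicated fields)
theorem mfm_new_char (c u : PySem.Dict String String) (rf : List String) :
    rf.foldl (mfmNewStep c u) (PySem.Set.empty, [])
      = (PySem.Set.ofList rf, (PySem.List.dedup rf).filterMap (mfmNewsF c u)) := by
  induction rf using List.reverseRecOn with
  | nil => rfl
  | append_singleton xs x ih =>
    rw [List.foldl_append]
    simp only [List.foldl_cons, List.foldl_nil, ih]
    rw [mfm_dedup_append_singleton, PySem.Set.ofList_append_singleton]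
    by_cases hm : x ∈ xs
    · have hc : (PySem.Set.ofList xs).contains x = true :=
        (PySem.Set.contains_iff _ _).2 ((PySem.Set.mem_ofList _ _).2 hm)
      simp [mfmNewStep, hc, hm, PySem.Set.add]
    · have hc : (PySem.Set.ofList xs).contains x = false := by
        rw [Bool.eq_false_iff]
        exact fun h => hm ((PySem.Set.mem_ofList _ _).1 ((PySem.Set.contains_iff _ _).1 h))
      have hx : List.filterMap (mfmNewsF c u) [x]
          = (if !(c.contains x) then
               match u.get? x with
               | some w => [(x, w)]
               | none   => []
             else []) := by
        by_cases hcf : c.contains x = true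
        · simp [mfmNewsF, hcf]
        · have hcf' : c.contains x = false := by simpa using hcf
          cases hg : u.get? x <;> simp [mfmNewsF, hcf', hg]
      simp only [mfmNewStep, hc, hm, List.filterMap_append, PySem.Set.add, hx]
      cases hcf : c.contains x <;> cases hg : u.get? x <;> simp [mfmNewsF, hcf, hg]

-- a Dict is its items list
theorem mfm_dict_eq_of_items_eq (d e : PySem.Dict String String)
    (h : d.items = e.items) : d = e := by
  cases d; cases e
  simp only [PySem.Dict.items] at h
  simp [h]

-- dict(list) with pairwise-distinct keys is the list itself
theorem mfm_ofList_nodup (ps : List (String × String))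
    (h : (ps.map Prod.fst).Nodup) : PySem.Dict.ofList ps = PySem.Dict.mk ps := by
  induction ps using List.reverseRecOn with
  | nil => rfl
  | append_singleton ps q ih =>
    have hps : (ps.map Prod.fst).Nodup := by
      rw [List.map_append] at h
      exact (List.nodup_append.mp h).1
    have hqf : q.1 ∉ ps.map Prod.fst := by
      have h1 : (ps.map Prod.fst ++ [q.1]).Nodup := by simpa using h
      intro hmem
      rcases List.nodup_append.mp h1 with ⟨-, -, h2⟩
      exact h2 q.1 hmem q.1 (List.mem_singleton_self _) rfl
    have hstep : PySem.Dict.ofList (ps ++ [q]) = (PySem.Dict.ofList ps).insert q.1 q.2 := by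
      unfold PySem.Dict.ofList PySem.Dict.update
      rw [List.foldl_append]
      rfl
    have hnc : (PySem.Dict.mk ps).contains q.1 = false := by
      rw [Bool.eq_false_iff]
      intro hc
      apply hqf
      simp only [PySem.Dict.contains, List.any_eq_true] at hc
      obtain ⟨p, hp, hpe⟩ := hc
      have : p.1 = q.1 := by simpa using hpe
      exact this ▸ List.mem_map_of_mem hp
    rw [hstep, ih hps]
    apply mfm_dict_eq_of_items_eq
    rw [PySem.Dict.items_insert_of_not_contains _ q.2 hnc]

-- keys facts used for the nodup argument
theorem mfm_filterMap_fst_sublist {α : Type} (g : (String × α) → Option (String × α))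
    (hkey : ∀ x p, g x = some p → p.1 = x.1) (l : List (String × α)) :
    ((l.filterMap g).map Prod.fst).Sublist (l.map Prod.fst) := by
  induction l with
  | nil => simp
  | cons x xs ih =>
    simp only [List.filterMap_cons, List.map_cons]
    cases hx : g x with
    | none => exact ih.cons _
    | some p =>
      rw [List.map_cons, hkey x p hx]
      exact ih.cons₂ _

theorem mfm_news_fst (c u : PySem.Dict String String) (l : List String) :
    (l.filterMap (mfmNewsF c u)).map Prod.fst
      = l.filter (fun f => !c.contains f && (u.get? f).isSome) := by
  induction l with
  | nil => rfl
  | cons x xs ih =>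
    rw [List.filterMap_cons, List.filter_cons]
    by_cases hc : c.contains x = true
    · have hx : mfmNewsF c u x = none := by simp [mfmNewsF, hc]
      simp [hx, hc, ih]
    · have hc' : c.contains x = false := by simpa using hc
      cases hg : u.get? x with
      | none =>
        have hx : mfmNewsF c u x = none := by simp [mfmNewsF, hc', hg]
        simp [hx, hc', hg, ih]
      | some v =>
        have hx : mfmNewsF c u x = some (x, v) := by simp [mfmNewsF, hc', hg]
        simp [hx, hc', hg, ih]

theorem mfm_canon_keys_nodup (current : List (String × String))
    (u : PySem.Dict String String) (rf : List String) :
    ((mfmCanon (PySem.Dict.ofList current) u rf).map Prod.fst).Nodup := by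
  set c := PySem.Dict.ofList current with hc
  have hckeys : (c.items.map Prod.fst).Nodup := by
    have := PySem.Dict.nodup_keys_ofList (ps := current) (κ := String) (ν := String)
    simpa [PySem.Dict.keys, hc] using this
  unfold mfmCanon
  rw [List.map_append]
  apply List.Nodup.append
  · exact (mfm_filterMap_fst_sublist _ (fun x p h => mfm_keep_key u rf x p h) _).nodup hckeys
  · rw [mfm_news_fst]
    exact (PySem.List.nodup_dedup rf).filter _
  · intro a ha hb
    simp only [List.mem_map, List.mem_filterMap] at ha
    obtain ⟨p, ⟨kv, hkv, hg⟩, hpa⟩ := ha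
    have h1 : a = kv.1 := by rw [← hpa, mfm_keep_key u rf kv p hg]
    have hac : c.contains a = true := by
      simp only [PySem.Dict.contains, List.any_eq_true]
      exact ⟨kv, hkv, by simp [h1]⟩
    rw [mfm_news_fst] at hb
    have := (List.mem_filter.mp hb).2
    simp [hac] at this

-- L4: B computes the canonical list
theorem mfm_B_char (current updates : List (String × String)) (rf : List String) :
    merge_field_mask_py_alt current updates rf
      = mfmCanon (PySem.Dict.ofList current) (PySem.Dict.ofList updates) rf := by
  show (PySem.Dict.ofList
      ((PySem.Dict.ofList current).items.foldl
          (mfmKeptStep (PySem.Set.ofList rf) (PySem.Dict.ofList updates)) []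
        ++ (rf.foldl (mfmNewStep (PySem.Dict.ofList current) (PySem.Dict.ofList updates))
            (PySem.Set.empty, [])).2)).items
      = mfmCanon (PySem.Dict.ofList current) (PySem.Dict.ofList updates) rf
  rw [mfm_kept_char, mfm_new_char]
  simp only [List.nil_append]
  rw [mfm_ofList_nodup _ (by exact mfm_canon_keys_nodup current _ rf)]
  rfl

-- ===== VERDICT (by name: the statement is the Claim_ definition above) =====
theorem merge_field_mask_py_spec : Claim_equal_merge_field_mask_py := by
  intro current updates requested_fields _
  unfold Spec_merge_field_mask_py
  rw [mfm_B_char]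
  unfold merge_field_mask_py
  exact mfm_A_char _ _ _
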